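-- pv_equiv track=rewrite | github.com/ZhaolinGao/NCF | data_utils.py | binarize_dataset
-- ===== SOURCE A (Python) =====
-- def binarize_dataset(threshold, training_users, training_items, training_ratings):
--     for i in range(len(training_ratings)):
--         if training_ratings[i] > threshold:
--             training_ratings[i] = 1
--         else:
--             training_ratings[i] = 0
--     training_users = [training_users[i] for i in range(len(training_ratings)) if training_ratings[i] != 0]
--     training_items = [training_items[i] for i in range(len(training_ratings)) if training_ratings[i] != 0]
--     training_ratings = [rating for rating in training_ratings if rating != 0]
--     return training_users, training_items, training_ratings
-- ===== SOURCE B (Python) =====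
-- def binarize_dataset(threshold, training_users, training_items, training_ratings):
--     # single fused pass: binarize in place (same side effect as A) and collect kept triples
--     users, items, ratings = [], [], []
--     for i in range(len(training_ratings)):
--         keep = training_ratings[i] > threshold
--         training_ratings[i] = 1 if keep else 0
--         if keep:
--             users.append(training_users[i])
--             items.append(training_items[i])
--             ratings.append(1)
--     return users, items, ratings
-- ===== Notes on version B (the rewrite author's own statement) =====
-- stated objective: simpler
-- what changed: A binarizes in one pass and then runs three separate filtering comprehensions over the binarized list; B does one fused pass that binarizes in place and simultaneously collects the kept users, items and 1-ratings.
import Mathlib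
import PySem

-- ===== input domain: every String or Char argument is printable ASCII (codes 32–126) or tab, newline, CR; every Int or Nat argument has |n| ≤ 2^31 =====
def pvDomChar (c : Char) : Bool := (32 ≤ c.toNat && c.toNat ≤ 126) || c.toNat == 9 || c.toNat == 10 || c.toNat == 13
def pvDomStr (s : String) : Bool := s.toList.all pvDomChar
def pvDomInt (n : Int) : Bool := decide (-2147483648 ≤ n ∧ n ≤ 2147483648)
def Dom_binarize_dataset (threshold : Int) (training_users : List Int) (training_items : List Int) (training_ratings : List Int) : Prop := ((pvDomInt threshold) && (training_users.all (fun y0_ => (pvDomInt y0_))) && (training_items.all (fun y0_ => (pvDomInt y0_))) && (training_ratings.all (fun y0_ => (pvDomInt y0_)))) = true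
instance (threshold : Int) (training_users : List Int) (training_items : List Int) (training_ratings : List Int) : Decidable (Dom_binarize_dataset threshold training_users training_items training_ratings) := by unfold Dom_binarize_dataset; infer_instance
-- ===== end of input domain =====

-- B fuses A's binarize pass and three filter comprehensions into one collecting pass; return values proved equal on Pre_ (both mutate training_ratings in place in Python; the equivalence is about the return value).

-- ===== PORT A =====
-- the in-place binarize loop: training_ratings[i] = 1 if > threshold else 0 (structural recursion over the same list)
def pvBinPass (threshold : Int) : List Int → List Int
  | [] => []
  | r :: rs => (if r > threshold then 1 else 0) :: pvBinPass threshold rs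

-- [xs[i] for i in range(len(bs)) if bs[i] != 0]; indexing past xs raises IndexError in Python
-- (excluded by Pre_), here it yields the default 0 — exact on Pre_.
def pvComp : List Int → List Int → List Int
  | _, [] => []
  | xs, b :: bs => if b ≠ 0 then xs.headD 0 :: pvComp xs.tail bs else pvComp xs.tail bs

-- [rating for rating in tr if rating != 0]
def pvFilt : List Int → List Int
  | [] => []
  | r :: rs => if r ≠ 0 then r :: pvFilt rs else pvFilt rs

def binarize_dataset (threshold : Int) (training_users : List Int) (training_items : List Int) (training_ratings : List Int) : List Int × List Int × List Int :=
  let tr := pvBinPass threshold training_ratings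
  (pvComp training_users tr, pvComp training_items tr, pvFilt tr)

-- ===== PORT B =====
-- single fused pass over the ratings, consuming users/items alongside; out-of-range
-- access (Python IndexError, excluded by Pre_) yields the default 0 — exact on Pre_.
def pvAltLoop (threshold : Int) : List Int → List Int → List Int → List Int × List Int × List Int
  | us, is_, [] => (us.take 0, is_.take 0, [])
  | us, is_, r :: rs =>
    let rest := pvAltLoop threshold us.tail is_.tail rs
    if r > threshold then (us.headD 0 :: rest.1, is_.headD 0 :: rest.2.1, 1 :: rest.2.2)
    else rest

def binarize_dataset_alt (threshold : Int) (training_users : List Int) (training_items : List Int) (training_ratings : List Int) : List Int × List Int × List Int :=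
  pvAltLoop threshold training_users training_items training_ratings

-- ===== PRECONDITION & SPEC =====
-- Pre_ excludes exactly the inputs where Python A raises IndexError: a kept index
-- (rating above threshold) beyond the end of training_users or training_items.
def Pre_binarize_dataset (threshold : Int) (training_users : List Int) (training_items : List Int) (training_ratings : List Int) : Prop :=
  ∀ i : Nat, i < training_ratings.length → training_ratings[i]! > threshold →
    i < training_users.length ∧ i < training_items.length
instance (threshold : Int) (training_users : List Int) (training_items : List Int) (training_ratings : List Int) : Decidable (Pre_binarize_dataset threshold training_users training_items training_ratings) := by unfold Pre_binarize_dataset; infer_instance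

def pvWitness_binarize_dataset : Int × List Int × List Int × List Int := (0, [5, 6], [7, 8], [1, 0])

def Spec_binarize_dataset (threshold : Int) (training_users : List Int) (training_items : List Int) (training_ratings : List Int) (out : List Int × List Int × List Int) : Prop := out = binarize_dataset_alt threshold training_users training_items training_ratings
instance (threshold : Int) (training_users : List Int) (training_items : List Int) (training_ratings : List Int) (out : List Int × List Int × List Int) : Decidable (Spec_binarize_dataset threshold training_users training_items training_ratings out) := by unfold Spec_binarize_dataset; infer_instance

-- ===== CLAIM (what is proved, stated in full; the proofs are below) =====
def Claim_equal_binarize_dataset : Prop := ∀ (threshold : Int) (training_users : List Int) (training_items : List Int) (training_ratings : List Int), Dom_binarize_dataset threshold training_users training_items training_ratings → Pre_binarize_dataset threshold training_users training_items training_ratings → Spec_binarize_dataset threshold training_users training_items training_ratings (binarize_dataset threshold training_users training_items training_ratings)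

-- ===== LEMMAS AND PROOFS =====

-- A's three passes over the binarized list equal B's single fused pass, for all inputs.
theorem pv_key (threshold : Int) (rs : List Int) : ∀ (us is_ : List Int),
    (pvComp us (pvBinPass threshold rs), pvComp is_ (pvBinPass threshold rs),
      pvFilt (pvBinPass threshold rs)) = pvAltLoop threshold us is_ rs := by
  induction rs with
  | nil => intro us is_; simp [pvBinPass, pvComp, pvFilt, pvAltLoop]
  | cons r rs ih =>
    intro us is_
    by_cases h : r > threshold
    · simp [pvBinPass, pvComp, pvFilt, pvAltLoop, h, ← ih us.tail is_.tail]
    · simp [pvBinPass, pvComp, pvFilt, pvAltLoop, h, ← ih us.tail is_.tail]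

-- ===== VERDICT (by name: the statement is the Claim_ definition above) =====
theorem binarize_dataset_spec : Claim_equal_binarize_dataset := by
  intro threshold us is_ rs _ _
  unfold Spec_binarize_dataset binarize_dataset binarize_dataset_alt
  exact pv_key threshold rs us is_
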